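-- pv_equiv track=rewrite | github.com/NestorPala/Algo1 | baldosas_rva.py | validar_formato_camino
-- ===== SOURCE A (Python) =====
-- def validar_formato_camino(camino: str, colores: list) -> bool:
--     formato_correcto = True
--     camino2 = list()
--
--     for letra in camino:
--         camino2.append(letra)
--
--     # Valido que solo haya una baldosa pintada
--     for i in range(len(colores)):
--         if camino2.count(colores[i]) > 1:
--             formato_correcto = False
--
--     # Valido que haya solo asteriscos en las ubicaciones no pintadas
--     if formato_correcto:
--         for letra in camino2:
--             if letra != "*" and letra not in colores:
--                 formato_correcto = False
--
--     return formato_correcto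
-- ===== SOURCE B (Python) =====
-- def validar_formato_camino(camino: str, colores: list) -> bool:
--     col = set(colores)
--     seen = set()
--     ok = True
--     for letra in camino:
--         if letra in col:
--             if letra in seen:
--                 ok = False
--             else:
--                 seen.add(letra)
--         elif letra != "*":
--             ok = False
--     return ok
-- ===== Notes on version B (the rewrite author's own statement) =====
-- stated objective: faster
-- what changed: Replaces the per-color .count() scan plus a separate validity loop with one pass over camino maintaining a seen-set and a color membership set.
import Mathlib
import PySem

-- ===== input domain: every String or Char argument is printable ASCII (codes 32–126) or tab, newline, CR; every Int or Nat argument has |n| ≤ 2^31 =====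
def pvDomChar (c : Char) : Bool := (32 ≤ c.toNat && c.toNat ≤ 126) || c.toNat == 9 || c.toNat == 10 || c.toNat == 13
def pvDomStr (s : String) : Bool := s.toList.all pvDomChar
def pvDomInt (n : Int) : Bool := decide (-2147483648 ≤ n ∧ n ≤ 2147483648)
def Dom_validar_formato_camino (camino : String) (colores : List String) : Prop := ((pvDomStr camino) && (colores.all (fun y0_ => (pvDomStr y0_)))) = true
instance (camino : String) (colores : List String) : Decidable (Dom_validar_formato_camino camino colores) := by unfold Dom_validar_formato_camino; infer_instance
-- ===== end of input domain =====

-- B merges A's per-color count scan and validity loop into ONE pass with a seen-set (asymptotically fewer scans).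

-- ===== PORT A =====
def validar_formato_camino (camino : String) (colores : List String) : Bool :=
  let camino2 : List String :=
    camino.toList.foldl (fun acc letra => acc ++ [String.ofList [letra]]) []
  let fc1 : Bool :=
    (PySem.List.pyRange 0 colores.length 1).foldl
      (fun fc i => if PySem.List.count camino2 (PySem.List.pyGetD colores i "") > 1 then false else fc)
      true
  if fc1 then
    camino2.foldl (fun fc letra => if (letra != "*") && !(colores.contains letra) then false else fc) fc1
  else fc1

-- ===== PORT B =====
-- one step of B's single pass: state = (seen-set of colors met, validity flag)
def pvBStep (col : PySem.Set String) (st : PySem.Set String × Bool) (s : String) :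
    PySem.Set String × Bool :=
  if PySem.Set.contains col s then
    if PySem.Set.contains st.1 s then (st.1, false) else (PySem.Set.add st.1 s, st.2)
  else if s != "*" then (st.1, false) else st

def validar_formato_camino_alt (camino : String) (colores : List String) : Bool :=
  let col : PySem.Set String := PySem.Set.ofList colores
  (camino.toList.foldl (fun st letra => pvBStep col st (String.ofList [letra]))
    (PySem.Set.empty, true)).2

-- ===== PRECONDITION & SPEC =====
def Spec_validar_formato_camino (camino : String) (colores : List String) (out : Bool) : Prop := out = validar_formato_camino_alt camino colores
instance (camino : String) (colores : List String) (out : Bool) : Decidable (Spec_validar_formato_camino camino colores out) := by unfold Spec_validar_formato_camino; infer_instance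

-- ===== CLAIM (what is proved, stated in full; the proofs are below) =====
def Claim_equal_validar_formato_camino : Prop := ∀ (camino : String) (colores : List String), Dom_validar_formato_camino camino colores → Spec_validar_formato_camino camino colores (validar_formato_camino camino colores)

-- ===== LEMMAS AND PROOFS =====

-- common characterisation: the format is valid
abbrev pvOK (camino2 colores : List String) : Prop :=
  (∀ c ∈ colores, camino2.count c ≤ 1) ∧ (∀ x ∈ camino2, x = "*" ∨ x ∈ colores)

-- A's flag loops: an if-false fold is a "no element satisfies p" check
theorem pv_foldl_flag {α : Type} (p : α → Prop) [DecidablePred p] :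
    ∀ (l : List α) (b : Bool),
      l.foldl (fun fc x => if p x then false else fc) b = (b && decide (∀ x ∈ l, ¬ p x)) := by
  intro l
  induction l with
  | nil => intro b; simp
  | cons x t ih =>
    intro b
    rw [List.foldl_cons]
    by_cases h : p x
    · rw [if_pos h, ih]
      simp [h]
    · rw [if_neg h, ih]
      simp [h]

theorem pv_A_eq (camino : String) (colores : List String) :
    validar_formato_camino camino colores
      = decide (pvOK (camino.toList.map (fun c => String.ofList [c])) colores) := by
  simp only [validar_formato_camino, PySem.List.foldl_append_singleton_eq_map, List.nil_append]
  rw [PySem.List.foldl_pyRange_zero_pyGetD' colores ""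
        (fun fc c => if PySem.List.count (camino.toList.map (fun c => String.ofList [c])) c > 1 then false else fc) true]
  rw [pv_foldl_flag (fun c => PySem.List.count (camino.toList.map (fun c => String.ofList [c])) c > 1)]
  rw [pv_foldl_flag (fun letra => ((letra != "*") && !(colores.contains letra)) = true)]
  have hsplit : ∀ (a b : Bool), (if a = true then a && b else a) = (a && b) := by decide
  simp only [Bool.true_and]
  rw [hsplit, Bool.eq_iff_iff]
  simp only [Bool.and_eq_true, decide_eq_true_eq]
  unfold pvOK
  constructor
  · rintro ⟨hp, hq⟩
    constructor
    · intro c hc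
      have := hp c hc
      simp only [PySem.List.count_eq] at this ⊢
      omega
    · intro x hx
      have := hq x hx
      simp only [bne_iff_ne, Bool.not_eq_true', List.contains_eq_mem,
        decide_eq_false_iff_not, ne_eq, not_and, not_not] at this
      by_cases hx2 : x = "*"
      · exact Or.inl hx2
      · exact Or.inr (this hx2)
  · rintro ⟨hp, hq⟩
    constructor
    · intro c hc
      have := hp c hc
      simp only [PySem.List.count_eq] at this ⊢
      omega
    · intro x hx
      have := hq x hx
      simp only [bne_iff_ne, Bool.not_eq_true', List.contains_eq_mem,
        decide_eq_false_iff_not, ne_eq, not_and, not_not]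
      intro hne
      exact this.resolve_left hne

-- B's invariant: the flag after folding the rest equals "flag so far" AND a closed condition
abbrev pvGood (col seen l : List String) : Prop :=
  ∀ x ∈ l, (x ∈ col → x ∉ seen ∧ l.count x ≤ 1) ∧ (x ∉ col → x = "*")

theorem pv_B_inv (col : List String) :
    ∀ (l : List String) (seen : PySem.Set String) (ok : Bool),
      (l.foldl (pvBStep col) (seen, ok)).2 = (ok && decide (pvGood col seen l)) := by
  intro l
  induction l with
  | nil => intro seen ok; simp [pvGood]
  | cons x t ih =>
    intro seen ok
    simp only [List.foldl_cons, pvBStep]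
    by_cases hcol : x ∈ col
    · by_cases hseen : x ∈ seen
      · simp only [PySem.Set.contains, List.contains_eq_mem, hcol, hseen, decide_true, if_true, ih]
        have : ¬ pvGood col seen (x :: t) := by
          intro h
          exact ((h x (List.mem_cons_self)).1 hcol).1 hseen
        simp [this]
      · simp only [PySem.Set.contains, List.contains_eq_mem, hcol, hseen, decide_true,
          decide_false, if_true, if_false, Bool.false_eq_true, ih]
        congr 1
        rw [decide_eq_decide]
        unfold pvGood
        constructor
        · intro h y hy
          rcases List.mem_cons.mp hy with rfl | hyt
          · refine ⟨fun _ => ⟨hseen, ?_⟩, fun hnc => absurd hcol hnc⟩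
            by_cases hxt : y ∈ t
            · exact absurd ((PySem.Set.mem_add seen y y).mpr (Or.inr rfl)) ((h y hxt).1 hcol).1
            · rw [List.count_cons_self, List.count_eq_zero_of_not_mem hxt]
          · have := h y hyt
            refine ⟨fun hc => ?_, this.2⟩
            have h2 := (this.1 hc)
            constructor
            · intro hys
              exact h2.1 ((PySem.Set.mem_add seen x y).mpr (Or.inl hys))
            · by_cases hyx : y = x
              · subst hyx
                exact absurd ((PySem.Set.mem_add seen y y).mpr (Or.inr rfl)) h2.1
              · rw [List.count_cons_of_ne (fun h => hyx h.symm)]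
                exact h2.2
        · intro h y hy
          have hx := h x (List.mem_cons_self)
          refine ⟨fun hc => ⟨?_, ?_⟩, (h y (List.mem_cons_of_mem x hy)).2⟩
          · intro hys
            rcases (PySem.Set.mem_add seen x y).mp hys with hys' | rfl
            · exact ((h y (List.mem_cons_of_mem x hy)).1 hc).1 hys'
            · have hle := (hx.1 hcol).2
              rw [List.count_cons_self] at hle
              have hpos := List.count_pos_iff.mpr hy
              omega
          · have h2 := ((h y (List.mem_cons_of_mem x hy)).1 hc).2
            by_cases hyx : y = x
            · subst hyx
              rw [List.count_cons_self] at h2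
              omega
            · rw [List.count_cons_of_ne (fun h => hyx h.symm)] at h2
              exact h2
    · by_cases hast : x = "*"
      · subst hast
        simp only [PySem.Set.contains, List.contains_eq_mem, hcol, decide_false, if_false,
          Bool.false_eq_true, bne_self_eq_false, ih]
        congr 1
        rw [decide_eq_decide]
        unfold pvGood
        constructor
        · intro h y hy
          rcases List.mem_cons.mp hy with rfl | hyt
          · exact ⟨fun hc => absurd hc hcol, fun _ => rfl⟩
          · have := h y hyt
            refine ⟨fun hc => ⟨(this.1 hc).1, ?_⟩, this.2⟩
            have h2 := (this.1 hc).2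
            have hne : y ≠ "*" := fun he => hcol (he ▸ hc)
            rw [List.count_cons_of_ne (fun h => hne h.symm)]
            exact h2
        · intro h y hy
          have := h y (List.mem_cons_of_mem _ hy)
          refine ⟨fun hc => ⟨(this.1 hc).1, ?_⟩, this.2⟩
          have h2 := (this.1 hc).2
          have hne : y ≠ "*" := fun he => hcol (he ▸ hc)
          rw [List.count_cons_of_ne (fun h => hne h.symm)] at h2
          exact h2
      · have hc1 : PySem.Set.contains col x = false := by
          simp [PySem.Set.contains, List.contains_eq_mem, hcol]
        have hc2 : (x != "*") = true := by simp [hast]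
        simp only [hc1, hc2, Bool.false_eq_true, if_false, if_true, ih]
        have hng : ¬ pvGood col seen (x :: t) := by
          intro h
          exact hast ((h x List.mem_cons_self).2 hcol)
        simp [hng]

theorem pv_B_eq (camino : String) (colores : List String) :
    validar_formato_camino_alt camino colores
      = decide (pvOK (camino.toList.map (fun c => String.ofList [c])) colores) := by
  simp only [validar_formato_camino_alt]
  have : (camino.toList.foldl
            (fun st letra => pvBStep (PySem.Set.ofList colores) st (String.ofList [letra]))
            (PySem.Set.empty, true))
        = ((camino.toList.map (fun c => String.ofList [c])).foldl
            (pvBStep (PySem.Set.ofList colores)) (PySem.Set.empty, true)) := by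
    rw [List.foldl_map]
  rw [this, pv_B_inv, Bool.true_and, decide_eq_decide]
  set camino2 := camino.toList.map (fun c => String.ofList [c]) with hc2
  unfold pvGood pvOK
  constructor
  · intro h
    constructor
    · intro c hc
      by_cases hmem : c ∈ camino2
      · exact ((h c hmem).1 ((PySem.Set.mem_ofList _ _).mpr hc)).2
      · simp [List.count_eq_zero_of_not_mem hmem]
    · intro x hx
      by_cases hcl : x ∈ colores
      · exact Or.inr hcl
      · exact Or.inl ((h x hx).2 (fun hm => hcl ((PySem.Set.mem_ofList _ _).mp hm)))
  · intro ⟨h1, h2⟩ x hx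
    constructor
    · intro hc
      exact ⟨List.not_mem_nil, h1 x ((PySem.Set.mem_ofList _ _).mp hc)⟩
    · intro hnc
      exact (h2 x hx).resolve_right (fun hm => hnc ((PySem.Set.mem_ofList _ _).mpr hm))

-- ===== VERDICT (by name: the statement is the Claim_ definition above) =====
theorem validar_formato_camino_spec : Claim_equal_validar_formato_camino := by
  intro camino colores _
  unfold Spec_validar_formato_camino
  rw [pv_A_eq, pv_B_eq]
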